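-- pv_equiv track=rewrite | github.com/jeganpillai/python_reference | p0016_check_if_all_a_appears_before_all_b.py | Grow_With_Data
-- ===== SOURCE A (Python) =====
-- def Grow_With_Data(s):
--     if s[0] == 'b' and 'a' in s: # 'baaab'
--         return False
--     if 'a' in s and not 'b' in s: # 'aaaaa'
--         return True
--     if s[0] == 'b' and not 'a' in s: # 'bbbbb'
--         return True
--     c = s[0]
--     for indx, val in enumerate(s):
--         if c == val:
--             continue
--         elif c in s[indx+1:]:
--             return False
--     return True
-- ===== SOURCE B (Python) =====
-- def Grow_With_Data(s):
--     c = s[0]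
--     if c == 'b':
--         return 'a' not in s
--     if 'a' in s and 'b' not in s:
--         return True
--     i = 0
--     n = len(s)
--     while i < n and s[i] == c:
--         i += 1
--     return c not in s[i:]
-- ===== Notes on version B (the rewrite author's own statement) =====
-- stated objective: faster
-- what changed: Replaces the quadratic enumerate loop (a fresh substring scan s[indx+1:] at every differing position) with a single linear pass: skip the leading run of the first character, then check it never reappears; the a/b special cases collapse to one membership test per branch.
import Mathlib
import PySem

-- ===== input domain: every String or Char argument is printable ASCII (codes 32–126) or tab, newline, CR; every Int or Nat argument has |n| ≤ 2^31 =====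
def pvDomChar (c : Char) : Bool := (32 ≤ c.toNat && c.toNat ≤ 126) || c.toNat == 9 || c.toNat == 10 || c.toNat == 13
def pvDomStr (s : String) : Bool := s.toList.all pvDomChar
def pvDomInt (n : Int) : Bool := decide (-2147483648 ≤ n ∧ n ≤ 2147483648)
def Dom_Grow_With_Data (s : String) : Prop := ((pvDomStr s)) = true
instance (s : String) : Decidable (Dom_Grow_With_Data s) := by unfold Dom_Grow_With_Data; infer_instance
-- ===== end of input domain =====

-- B replaces A's quadratic enumerate-with-substring-scan loop by one linear pass (objective: faster).

-- ===== PORT A =====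
-- the for-loop of A: 'for indx, val in enumerate(s): if c == val: continue; elif c in s[indx+1:]: return False' then 'return True'
def growLoopA (l : List Char) (c : Char) : Nat → List Char → Bool
  | _, [] => true
  | indx, val :: rest =>
      if c == val then growLoopA l c (indx + 1) rest
      else if PySem.Chars.isIn [c] (PySem.List.slice l (some ((indx : Int) + 1)) none) then false
      else growLoopA l c (indx + 1) rest

def Grow_With_Data (s : String) : Bool :=
  match PySem.List.pyGet? s.toList 0 with
  | none => false   -- s[0] raises IndexError on the empty string; excluded by Pre_
  | some s0 =>
    if s0 == 'b' && PySem.Chars.isIn ['a'] s.toList then false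
    else if PySem.Chars.isIn ['a'] s.toList && !(PySem.Chars.isIn ['b'] s.toList) then true
    else if s0 == 'b' && !(PySem.Chars.isIn ['a'] s.toList) then true
    else growLoopA s.toList s0 0 s.toList

-- ===== PORT B =====
-- the while-loop of B: advance i past the leading run of c (returns s[i:])
def skipEq (c : Char) : List Char → List Char
  | [] => []
  | x :: xs => if x == c then skipEq c xs else x :: xs

def Grow_With_Data_alt (s : String) : Bool :=
  match PySem.List.pyGet? s.toList 0 with
  | none => false   -- s[0] raises IndexError on the empty string; excluded by Pre_
  | some c =>
    if c == 'b' then !(PySem.Chars.isIn ['a'] s.toList)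
    else if PySem.Chars.isIn ['a'] s.toList && !(PySem.Chars.isIn ['b'] s.toList) then true
    else !(PySem.Chars.isIn [c] (skipEq c s.toList))

-- ===== PRECONDITION & SPEC =====
-- A evaluates s[0], which raises IndexError on the empty string; everything else is total.
def Pre_Grow_With_Data (s : String) : Prop := s ≠ ""
instance (s : String) : Decidable (Pre_Grow_With_Data s) := by unfold Pre_Grow_With_Data; infer_instance
def pvWitness_Grow_With_Data : String := "aab"

def Spec_Grow_With_Data (s : String) (out : Bool) : Prop := out = Grow_With_Data_alt s
instance (s : String) (out : Bool) : Decidable (Spec_Grow_With_Data s out) := by unfold Spec_Grow_With_Data; infer_instance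

-- ===== CLAIM (what is proved, stated in full; the proofs are below) =====
def Claim_equal_Grow_With_Data : Prop := ∀ (s : String), Dom_Grow_With_Data s → Pre_Grow_With_Data s → Spec_Grow_With_Data s (Grow_With_Data s)

-- ===== LEMMAS AND PROOFS =====

-- 'c in s' for a single character c is list membership
theorem isIn_singleton (c : Char) (l : List Char) :
    PySem.Chars.isIn [c] l = l.contains c := by
  rw [List.contains_eq_mem]
  by_cases h : c ∈ l
  · rw [(PySem.Chars.isIn_iff_infix [c] l).2 ((List.singleton_infix_iff c l).2 h)]
    simp [h]
  · rw [(PySem.Chars.isIn_eq_false_iff [c] l).2 (fun hi => h ((List.singleton_infix_iff c l).1 hi))]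
    simp [h]

theorem skipEq_subset (c : Char) (t : List Char) : ∀ x, x ∈ skipEq c t → x ∈ t := by
  induction t with
  | nil => simp [skipEq]
  | cons y ys ih =>
      intro x hx
      simp only [skipEq] at hx
      by_cases hy : y == c
      · simp only [hy] at hx
        exact List.mem_cons_of_mem y (ih x hx)
      · simpa using (by simpa [hy] using hx)

theorem growLoopA_eq (l : List Char) (c : Char) :
    ∀ (t : List Char) (indx : Nat), t = l.drop indx →
      growLoopA l c indx t = !((skipEq c t).contains c) := by
  intro t
  induction t with
  | nil => intro indx _; simp [growLoopA, skipEq]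
  | cons v rest ih =>
      intro indx hdrop
      have hrest : rest = l.drop (indx + 1) := by
        have := congrArg List.tail hdrop
        simpa [List.tail_drop] using this
      have hslice : PySem.List.slice l (some ((indx : Int) + 1)) none = l.drop (indx + 1) := by
        have h1 : ((indx : Int) + 1) = ((indx + 1 : Nat) : Int) := by push_cast; ring
        rw [h1, PySem.List.slice_from_natCast]
      rw [growLoopA, hslice, ← hrest, isIn_singleton]
      by_cases hcv : c = v
      · subst hcv
        rw [if_pos (by simp)]
        rw [ih (indx + 1) hrest]
        simp [skipEq]
      · rw [if_neg (by simpa using hcv)]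
        have hskip : skipEq c (v :: rest) = v :: rest := by
          have : (v == c) = false := by simp [Ne.symm hcv]
          simp [skipEq, this]
        rw [hskip]
        by_cases hmem : c ∈ rest
        · simp [List.contains_eq_mem, hmem]
        · have hns : c ∉ skipEq c rest := fun h => hmem (skipEq_subset c rest c h)
          have hcont : rest.contains c = false := by simp [List.contains_eq_mem, hmem]
          simp only [hcont, Bool.false_eq_true, if_false]
          rw [ih (indx + 1) hrest]
          simp [List.contains_eq_mem, hmem, hns, hcv]

-- ===== VERDICT (by name: the statement is the Claim_ definition above) =====
theorem Grow_With_Data_spec : Claim_equal_Grow_With_Data := by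
  intro s _ hpre
  unfold Spec_Grow_With_Data Grow_With_Data Grow_With_Data_alt
  have hl : s.toList ≠ [] := fun h => hpre (String.toList_eq_nil_iff.mp h)
  obtain ⟨x, xs, hlist⟩ := List.exists_cons_of_ne_nil hl
  rw [hlist, PySem.List.pyGet?_zero_cons]
  by_cases hx : x = 'b'
  · subst hx
    by_cases ha : PySem.Chars.isIn ['a'] ('b' :: xs) = true
    · simp [ha]
    · have ha' : PySem.Chars.isIn ['a'] ('b' :: xs) = false := by simpa using ha
      simp [ha']
  · have hxb : (x == 'b') = false := by simp [hx]
    simp only [hxb, Bool.false_and, Bool.false_eq_true, if_false]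
    by_cases hab : (PySem.Chars.isIn ['a'] (x :: xs) && !(PySem.Chars.isIn ['b'] (x :: xs))) = true
    · simp [hab]
    · have hab' : (PySem.Chars.isIn ['a'] (x :: xs) && !(PySem.Chars.isIn ['b'] (x :: xs))) = false := by
        simpa using hab
      simp only [hab', Bool.false_eq_true, if_false]
      rw [isIn_singleton]
      exact growLoopA_eq (x :: xs) x (x :: xs) 0 rfl
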